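-- pv_equiv track=rewrite | github.com/Forestryks/kJudge | kernel/utils/syscalls/utils.py | find_block
-- ===== SOURCE A (Python) =====
-- def find_block(text, pos, parentheses):
--     opened = False
--     balance = 0
--
--     begin = pos
--     for i in range(pos, len(text)):
--         if text[i] == parentheses[0]:
--             balance += 1
--             if not opened:
--                 opened = True
--                 begin = i
--         elif text[i] == parentheses[1]:
--             balance -= 1
--         if opened and balance == 0:
--             return begin, i
--         if balance < 0:
--             raise ValueError
--     raise ValueError
-- ===== SOURCE B (Python) =====
-- def find_block(text, pos, parentheses):
--     opening, closing = parentheses[0], parentheses[1]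
--     n = len(text)
--
--     # locate the first opening parenthesis; a closer met first, or none found, is an error
--     begin = None
--     for i in range(pos, n):
--         ch = text[i]
--         if ch == opening:
--             begin = i
--             break
--         if ch == closing:
--             raise ValueError
--     if begin is None:
--         raise ValueError
--
--     def close_of(i):
--         # text[i] is an opener: recursive descent — walk forward, skipping each nested
--         # block by a recursive call, until this opener's own closer appears
--         j = i + 1
--         while j < n:
--             ch = text[j]
--             if ch == opening:
--                 j = close_of(j) + 1
--             elif ch == closing:
--                 return j
--             else:
--                 j += 1
--         raise ValueError
--
--     return begin, close_of(begin)
-- ===== Notes on version B (the rewrite author's own statement) =====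
-- stated objective: alternative
-- what changed: A's single scan with a balance counter is replaced by recursive descent on the nesting structure: locate the first opener, then find its closer by a recursive matcher that skips each nested block with a recursive call; no balance counter exists in B.
import Mathlib
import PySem

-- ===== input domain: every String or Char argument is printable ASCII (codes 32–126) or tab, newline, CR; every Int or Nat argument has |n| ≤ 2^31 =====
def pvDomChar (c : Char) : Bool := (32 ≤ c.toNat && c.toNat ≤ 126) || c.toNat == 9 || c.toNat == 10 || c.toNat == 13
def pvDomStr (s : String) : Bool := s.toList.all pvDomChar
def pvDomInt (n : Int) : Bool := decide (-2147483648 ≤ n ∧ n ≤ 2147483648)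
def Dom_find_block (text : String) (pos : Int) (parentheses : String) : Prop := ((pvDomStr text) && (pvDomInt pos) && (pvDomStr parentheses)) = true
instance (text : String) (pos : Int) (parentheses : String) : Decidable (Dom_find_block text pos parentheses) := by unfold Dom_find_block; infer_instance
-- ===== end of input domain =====

-- B replaces A's single balance-counter scan by recursive descent on the nesting structure:
-- find the first opener, then match its closer by a recursive matcher that skips each nested
-- block with a recursive call (no balance counter in B); same cost, different algorithm.
-- Both programs raise on exactly the same inputs (ports return the junk value (0,0) there), so
-- the proofs establish port equality on ALL inputs; Pre_find_block (where A actually returns)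
-- is therefore only a hypothesis of the stated claim, not used by the proof.

-- ===== PORT A =====
-- the interleaved loop of A; Option models the raising paths (IndexError/ValueError → none).
-- parentheses[0] / parentheses[1] are accessed lazily exactly where A's Python accesses them.
def pvLoopA (L : List Char) (oOpt cOpt : Option Char) :
    List Int → Bool → Int → Int → Option (Int × Int)
  | [], _, _, _ => none                                      -- loop ends: raise ValueError
  | i :: rest, opened, balance, beg =>
    match PySem.List.pyGet? L i with
    | none => none                                           -- text[i]: IndexError
    | some ch =>
      match oOpt with
      | none => none                                         -- parentheses[0]: IndexError
      | some o =>
        if ch = o then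
          let balance := balance + 1
          let beg := if !opened then i else beg
          if True ∧ balance = 0 then some (beg, i)           -- 'opened and balance == 0' (opened just set True)
          else if balance < 0 then none
          else pvLoopA L oOpt cOpt rest true balance beg
        else
          match cOpt with
          | none => none                                     -- parentheses[1]: IndexError
          | some c =>
            let balance := if ch = c then balance - 1 else balance
            if opened = true ∧ balance = 0 then some (beg, i)
            else if balance < 0 then none
            else pvLoopA L oOpt cOpt rest opened balance beg

def find_block (text : String) (pos : Int) (parentheses : String) : Int × Int :=
  let L := text.toList
  let P := parentheses.toList
  match pvLoopA L (PySem.List.pyGet? P 0) (PySem.List.pyGet? P 1)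
      (PySem.List.pyRange pos (L.length : Int) 1) false 0 pos with
  | some r => r
  | none => (0, 0)

-- ===== PORT B =====
-- B's first loop: find the index of the first opening; a closer first, or none found, is an error
def pvFindOpen (L : List Char) (o c : Char) : List Int → Option Int
  | [] => none
  | i :: rest =>
    match PySem.List.pyGet? L i with
    | none => none
    | some ch =>
      if ch = o then some i
      else if ch = c then none
      else pvFindOpen L o c rest

-- B's recursive-descent matcher close_of: pvWalk … j is close_of's inner walk at position j
-- (close_of i = pvWalk … (i+1)); the fuel argument is only a termination guard — the
-- equivalence lemmas show it never runs out at the size find_block_alt supplies.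
def pvWalk (L : List Char) (o c : Char) (n : Int) : Nat → Int → Option Int
  | 0, _ => none
  | fuel+1, j =>
    if j < n then
      match PySem.List.pyGet? L j with
      | none => none                                         -- text[j]: IndexError
      | some ch =>
        if ch = o then
          match pvWalk L o c n fuel (j+1) with               -- close_of(j) (recursive call)
          | none => none
          | some r => pvWalk L o c n fuel (r+1)              -- j = close_of(j) + 1; continue
        else if ch = c then some j
        else pvWalk L o c n fuel (j+1)
    else none                                                -- loop ends: raise ValueError

def find_block_alt (text : String) (pos : Int) (parentheses : String) : Int × Int :=
  let L := text.toList
  let P := parentheses.toList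
  let n : Int := L.length
  match PySem.List.pyGet? P 0, PySem.List.pyGet? P 1 with
  | some o, some c =>
    match pvFindOpen L o c (PySem.List.pyRange pos n 1) with
    | none => (0, 0)
    | some beg =>
      match pvWalk L o c n (2 * L.length + 2) (beg + 1) with
      | none => (0, 0)
      | some r => (beg, r)
  | _, _ => (0, 0)

-- ===== PRECONDITION & SPEC =====
-- Pre_find_block holds exactly when the Python A returns (otherwise A raises ValueError or
-- IndexError): parentheses supplies both characters, the start index is reachable (Python's
-- negative indices wrap, so the scanned characters are a suffix of the text followed by the whole
-- text when pos < 0), no closing parenthesis precedes the first opening one, and some window from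
-- that opening is balanced.
def Pre_find_block (text : String) (pos : Int) (parentheses : String) : Prop :=
  let L := text.toList
  let n : Int := L.length
  let P := parentheses.toList
  2 ≤ P.length ∧ -n ≤ pos ∧
  (let o := P[0]!
   let c := P[1]!
   let s := if pos < 0 then L.drop (pos + n).toNat ++ L else L.drop pos.toNat
   ∃ j < s.length, s[j]? = some o ∧
     (∀ t < j, s[t]? ≠ some o ∧ s[t]? ≠ some c) ∧
     ∃ k < s.length, j ≤ k ∧
       ((s.drop j).take (k - j + 1)).countP (fun ch => ch == o) =
         ((s.drop j).take (k - j + 1)).countP (fun ch => !(ch == o) && ch == c))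
instance (text : String) (pos : Int) (parentheses : String) : Decidable (Pre_find_block text pos parentheses) := by unfold Pre_find_block; infer_instance

def pvWitness_find_block : String × Int × String := ("a(b(c))d", 1, "()")

def Spec_find_block (text : String) (pos : Int) (parentheses : String) (out : Int × Int) : Prop := out = find_block_alt text pos parentheses
instance (text : String) (pos : Int) (parentheses : String) (out : Int × Int) : Decidable (Spec_find_block text pos parentheses out) := by unfold Spec_find_block; infer_instance

-- ===== CLAIM (what is proved, stated in full; the proofs are below) =====
def Claim_equal_find_block : Prop := ∀ (text : String) (pos : Int) (parentheses : String), Dom_find_block text pos parentheses → Pre_find_block text pos parentheses → Spec_find_block text pos parentheses (find_block text pos parentheses)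

-- ===== LEMMAS AND PROOFS =====

-- with parentheses[0] missing, A's loop always raises
theorem loopA_no_open (L : List Char) (cOpt : Option Char) :
    ∀ (l : List Int) (opened : Bool) (bal beg : Int),
      pvLoopA L none cOpt l opened bal beg = none := by
  intro l opened bal beg
  cases l with
  | nil => rfl
  | cons i rest =>
    simp only [pvLoopA]
    cases PySem.List.pyGet? L i <;> rfl

-- with parentheses[1] missing, A's opened loop can never return (balance only grows)
theorem loopA_no_close_opened (L : List Char) (o : Char) :
    ∀ (l : List Int) (bal beg : Int), 0 ≤ bal →
      pvLoopA L (some o) none l true bal beg = none := by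
  intro l
  induction l with
  | nil => intro bal beg _; rfl
  | cons i rest ih =>
    intro bal beg hbal
    simp only [pvLoopA]
    cases PySem.List.pyGet? L i with
    | none => rfl
    | some ch =>
      by_cases ho : ch = o
      · have h1 : ¬ (bal + 1 = 0) := by omega
        have h2 : ¬ (bal + 1 < 0) := by omega
        simp [ho, h1, h2, ih _ _ (by omega : (0:Int) ≤ bal + 1)]
      · simp [ho]

-- with parentheses[1] missing, A's unopened loop always raises
theorem loopA_no_close (L : List Char) (o : Char) :
    ∀ (l : List Int) (beg : Int),
      pvLoopA L (some o) none l false 0 beg = none := by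
  intro l
  induction l with
  | nil => intro beg; rfl
  | cons i rest ih =>
    intro beg
    simp only [pvLoopA]
    cases PySem.List.pyGet? L i with
    | none => rfl
    | some ch =>
      by_cases ho : ch = o
      · simp [ho, loopA_no_close_opened L o rest 1 i (by omega)]
      · simp [ho]

-- B's walk never returns an index left of where it starts
theorem walk_ge (L : List Char) (o c : Char) (n : Int) :
    ∀ (fuel : Nat) (j r : Int), pvWalk L o c n fuel j = some r → j ≤ r := by
  intro fuel
  induction fuel with
  | zero => intro j r h; simp [pvWalk] at h
  | succ fuel ih =>
    intro j r h
    simp only [pvWalk] at h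
    by_cases hj : j < n
    · simp only [hj, if_true] at h
      cases hch : PySem.List.pyGet? L j with
      | none => rw [hch] at h; exact absurd h (by simp)
      | some ch =>
        rw [hch] at h
        by_cases ho : ch = o
        · simp only [ho, if_true] at h
          cases h1 : pvWalk L o c n fuel (j + 1) with
          | none => rw [h1] at h; exact absurd h (by simp)
          | some r1 =>
            rw [h1] at h
            have := ih _ _ h1
            have := ih _ _ h
            omega
        · by_cases hc : ch = c
          · have hco : ¬ c = o := fun hh => ho (hc.trans hh)
            simp only [hc, hco, if_false, if_true, Option.some.injEq] at h
            omega
          · simp only [ho, hc, if_false] at h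
            have := ih _ _ h
            omega
    · simp [hj] at h

-- the heart: A's opened loop with balance b+1 pending equals B's walk closing one opener,
-- then (if more openers are pending) A's opened loop again
theorem loopA_opened_walk (L : List Char) (o c : Char) (n : Int) :
    ∀ (fuel : Nat) (j b beg : Int), 0 ≤ b → (n - j).toNat < fuel →
      pvLoopA L (some o) (some c) (PySem.List.pyRange j n 1) true (b + 1) beg =
        match pvWalk L o c n fuel j with
        | none => none
        | some r => if b = 0 then some (beg, r)
                    else pvLoopA L (some o) (some c) (PySem.List.pyRange (r+1) n 1) true b beg := by
  intro fuel
  induction fuel with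
  | zero => intro j b beg _ hf; omega
  | succ fuel ih =>
    intro j b beg hb hf
    by_cases hj : j < n
    · rw [PySem.List.pyRange_one_cons hj]
      simp only [pvLoopA, pvWalk, hj, if_true]
      cases hch : PySem.List.pyGet? L j with
      | none => rfl
      | some ch =>
        by_cases ho : ch = o
        · -- nested opener: A raises balance to b+2; B recurses
          have h1 : ¬ (True ∧ b + 1 + 1 = 0) := by simp; omega
          have h2 : ¬ (b + 1 + 1 < 0) := by omega
          simp only [ho, if_true, Bool.not_true, Bool.false_eq_true, if_false, h1, h2]
          rw [show b + 1 + 1 = (b + 1) + 1 from rfl,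
            ih (j+1) (b+1) beg (by omega) (by omega)]
          cases h3 : pvWalk L o c n fuel (j + 1) with
          | none => rfl
          | some r1 =>
            have hb1 : ¬ (b + 1 = 0) := by omega
            have hr1 : j + 1 ≤ r1 := walk_ge L o c n fuel (j+1) r1 h3
            simp only [hb1, if_false]
            rw [ih (r1+1) b beg hb (by omega)]
        · by_cases hc : ch = c
          · -- this opener's closer (or one level up): balance drops to b
            have hco : ¬ c = o := fun h => ho (hc.trans h)
            have hbb : b + 1 - 1 = b := by omega
            by_cases hb0 : b = 0
            · simp [hc, hco, hb0]
            · have h2 : ¬ b < 0 := by omega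
              simp only [hc, hco, if_false, if_true, hbb, true_and,
                if_neg hb0, if_neg h2]
          · -- ordinary character
            have h0 : ¬ (True ∧ b + 1 = 0) := by simp; omega
            have h2 : ¬ (b + 1 < 0) := by omega
            simp only [ho, hc, if_false, h0, h2]
            rw [ih (j+1) b beg hb (by omega)]
    · rw [PySem.List.pyRange_one_eq_nil (by omega)]
      simp [pvLoopA, pvWalk, hj]

-- A's whole loop over range(s, n) equals B's find-opener loop followed by the recursive matcher
theorem loopA_eq_alt (L : List Char) (o c : Char) (n : Int) (hn : n = (L.length : Int)) :
    ∀ (k : Nat) (s beg : Int), (n - s).toNat ≤ k →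
      pvLoopA L (some o) (some c) (PySem.List.pyRange s n 1) false 0 beg =
        (match pvFindOpen L o c (PySem.List.pyRange s n 1) with
         | none => none
         | some b => match pvWalk L o c n (2 * L.length + 2) (b + 1) with
                     | none => none
                     | some r => some (b, r)) := by
  intro k
  induction k with
  | zero =>
    intro s beg hk
    have hs : n ≤ s := by omega
    rw [PySem.List.pyRange_one_eq_nil hs]
    rfl
  | succ k ih =>
    intro s beg hk
    by_cases hs : s < n
    · rw [PySem.List.pyRange_one_cons hs]
      simp only [pvLoopA, pvFindOpen]
      cases hch : PySem.List.pyGet? L s with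
      | none => rfl
      | some ch =>
        by_cases ho : ch = o
        · -- opening found at s: A continues opened with balance 1; B starts close_of(s)
          have hsge : -(L.length : Int) ≤ s := by
            by_contra hlt
            have : ¬ PySem.Raise.InRange L.length s := by
              unfold PySem.Raise.InRange; omega
            rw [(PySem.List.pyGet?_eq_none_iff _ _).2 this] at hch
            exact absurd hch (by simp)
          simp only [ho, if_true, Bool.not_false]
          have h1 : ¬ ((0:Int) + 1 = 0) := by omega
          have h2 : ¬ ((0:Int) + 1 < 0) := by omega
          simp only [h1, true_and, if_false]
          rw [show (0:Int) + 1 = 0 + 1 from rfl,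
            loopA_opened_walk L o c n (2 * L.length + 2) (s+1) 0 s (le_refl 0) (by omega)]
          cases pvWalk L o c n (2 * L.length + 2) (s + 1) with
          | none => rfl
          | some r => simp
        · by_cases hc : ch = c
          · have hco : ¬ c = o := fun h => ho (hc.trans h)
            simp [hc, hco]
          · simp only [ho, hc, if_false]
            have h0 : ¬ (false = true ∧ (0:Int) = 0) := by simp
            have h2 : ¬ ((0:Int) < 0) := by omega
            simp only [if_false, h2]
            exact ih (s + 1) beg (by omega)
    · rw [PySem.List.pyRange_one_eq_nil (by omega)]
      rfl

-- ===== VERDICT (by name: the statement is the Claim_ definition above) =====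
theorem find_block_spec : Claim_equal_find_block := by
  intro text pos parentheses _ _
  show find_block text pos parentheses = find_block_alt text pos parentheses
  simp only [find_block, find_block_alt]
  cases h0 : PySem.List.pyGet? parentheses.toList 0 with
  | none => simp only [loopA_no_open]
  | some o =>
    cases h1 : PySem.List.pyGet? parentheses.toList 1 with
    | none => simp only [loopA_no_close]
    | some c =>
      dsimp only
      rw [loopA_eq_alt text.toList o c (text.toList.length : Int) rfl
        ((text.toList.length : Int) - pos).toNat pos pos (le_refl _)]
      cases pvFindOpen text.toList o c
          (PySem.List.pyRange pos (text.toList.length : Int) 1) with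
      | none => rfl
      | some b =>
        dsimp only
        cases pvWalk text.toList o c (text.toList.length : Int) (2 * text.toList.length + 2) (b + 1) <;> rfl
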